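-- pv_equiv track=rewrite | github.com/linusmoreau/AoC | 2019/day10.py | gen_from_pos
-- ===== SOURCE A (Python) =====
-- def gcd(dividend, divisor):
--     remainder = dividend % divisor
--     if remainder == 0:
--         return divisor
--     else:
--         return gcd(divisor, remainder)
--
-- def angle_ratio(h, v):
--     if h != 0 and v != 0:
--         if abs(v) > abs(h):
--             gcf = gcd(abs(v), abs(h))
--         else:
--             gcf = gcd(abs(h), abs(v))
--         v = v // gcf
--         h = h // gcf
--     elif h == 0:
--         if v > 0:
--             v = 1
--         elif v < 0:
--             v = -1
--     elif v == 0: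
--         if h > 0:
--             h = 1
--         elif h < 0:
--             h = -1
--     return h, v
--
-- def gen_from_pos(asteroids, a):
--     from_pos = {}
--     for o in asteroids:
--         if o == a:
--             continue
--         y_dif = o[1] - a[1]
--         x_dif = o[0] - a[0]
--         ratio = angle_ratio(x_dif, y_dif)
--         if ratio in from_pos:
--             value = from_pos[ratio]
--             value.append(o)
--             from_pos[ratio] = value
--         else:
--             from_pos[ratio] = [o]
--     return from_pos
-- ===== SOURCE B (Python) =====
-- def gen_from_pos(asteroids, a):
--     pairs = []
--     for o in asteroids:
--         if o != a:
--             h = o[0] - a[0]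
--             v = o[1] - a[1]
--             x, y = abs(h), abs(v)
--             while y:
--                 x, y = y, x % y
--             pairs.append(((h // x, v // x), o))
--     ratios = list(dict.fromkeys(r for r, _ in pairs))
--     return {r: [o for r2, o in pairs if r2 == r] for r in ratios}
-- ===== Notes on version B (the rewrite author's own statement) =====
-- stated objective: alternative
-- what changed: Replaces the recursive gcd + incremental dict accumulation with one pass that pairs each asteroid with its reduced direction (iterative inline Euclid on the absolute offsets), then groups by first-occurrence-deduplicated ratio keys via comprehensions; key and within-group order are preserved.
import Mathlib
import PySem

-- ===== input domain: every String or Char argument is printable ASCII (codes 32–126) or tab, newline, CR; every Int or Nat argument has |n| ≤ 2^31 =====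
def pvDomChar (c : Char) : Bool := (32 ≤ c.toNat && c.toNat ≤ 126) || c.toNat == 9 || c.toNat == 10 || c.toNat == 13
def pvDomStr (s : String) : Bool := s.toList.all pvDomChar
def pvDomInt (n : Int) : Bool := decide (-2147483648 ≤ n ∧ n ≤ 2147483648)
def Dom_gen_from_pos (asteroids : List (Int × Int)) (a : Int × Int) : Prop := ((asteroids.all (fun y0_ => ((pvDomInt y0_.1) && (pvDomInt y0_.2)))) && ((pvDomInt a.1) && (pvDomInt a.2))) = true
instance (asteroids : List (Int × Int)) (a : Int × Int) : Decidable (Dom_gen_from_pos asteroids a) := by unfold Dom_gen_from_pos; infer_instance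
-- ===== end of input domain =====

-- B replaces A's recursive gcd + incremental dict grouping by one pass building (ratio, asteroid)
-- pairs with an inline iterative Euclid, then grouping by first-occurrence-deduplicated keys (alternative decomposition).


-- ===== PORT A =====
-- A's recursive gcd; Python raises ZeroDivisionError on divisor = 0 (unreachable from gen_from_pos),
-- the 'divisor = 0' guard only makes the recursion total.
def gcdA (dividend divisor : Int) : Int :=
  if h0 : divisor = 0 then 0
  else
    let remainder := PySem.Int.mod dividend divisor
    if h1 : remainder = 0 then divisor
    else gcdA divisor remainder
termination_by divisor.natAbs
decreasing_by
  rcases lt_or_gt_of_ne h0 with hn | hp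
  · have := PySem.Int.mod_neg_bounds dividend hn; omega
  · have h2 := PySem.Int.mod_lt dividend hp
    have h3 := PySem.Int.mod_nonneg dividend hp
    omega

def angle_ratio (h v : Int) : Int × Int :=
  if h ≠ 0 ∧ v ≠ 0 then
    let gcf := if |v| > |h| then gcdA |v| |h| else gcdA |h| |v|
    (PySem.Int.floordiv h gcf, PySem.Int.floordiv v gcf)
  else if h = 0 then
    (h, if v > 0 then (1 : Int) else if v < 0 then -1 else v)
  else if v = 0 then
    ((if h > 0 then (1 : Int) else if h < 0 then -1 else h), v)
  else (h, v)

def gen_from_pos (asteroids : List (Int × Int)) (a : Int × Int) : List (Int × Int × List (Int × Int)) :=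
  (asteroids.foldl (fun (from_pos : PySem.Dict (Int × Int) (List (Int × Int))) o =>
    if o = a then from_pos
    else
      let y_dif := o.2 - a.2
      let x_dif := o.1 - a.1
      let ratio := angle_ratio x_dif y_dif
      match from_pos.get? ratio with
      | some value => from_pos.insert ratio (value ++ [o])
      | none => from_pos.insert ratio [o]) PySem.Dict.empty).items.map (fun p => (p.1.1, p.1.2, p.2))

-- ===== PORT B =====
-- the inline 'while y: x, y = y, x % y' loop of Source B
def gcdLoop (x y : Int) : Int :=
  if h0 : y = 0 then x
  else gcdLoop y (PySem.Int.mod x y)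
termination_by y.natAbs
decreasing_by
  rcases lt_or_gt_of_ne h0 with hn | hp
  · have := PySem.Int.mod_neg_bounds x hn; omega
  · have h2 := PySem.Int.mod_lt x hp
    have h3 := PySem.Int.mod_nonneg x hp
    omega

def gen_from_pos_alt (asteroids : List (Int × Int)) (a : Int × Int) : List (Int × Int × List (Int × Int)) :=
  let pairs := asteroids.foldl (fun ps o =>
    if o ≠ a then
      let h := o.1 - a.1
      let v := o.2 - a.2
      let x := gcdLoop |h| |v|
      ps ++ [((PySem.Int.floordiv h x, PySem.Int.floordiv v x), o)]
    else ps) ([] : List ((Int × Int) × (Int × Int)))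
  let ratios := PySem.List.dedup (pairs.map (·.1))
  ratios.map (fun r => (r.1, r.2, (pairs.filter (fun p => p.1 == r)).map (·.2)))

-- ===== PRECONDITION & SPEC =====
def Spec_gen_from_pos (asteroids : List (Int × Int)) (a : Int × Int) (out : List (Int × Int × List (Int × Int))) : Prop := out = gen_from_pos_alt asteroids a
instance (asteroids : List (Int × Int)) (a : Int × Int) (out : List (Int × Int × List (Int × Int))) : Decidable (Spec_gen_from_pos asteroids a out) := by unfold Spec_gen_from_pos; infer_instance

-- ===== CLAIM (what is proved, stated in full; the proofs are below) =====
def Claim_equal_gen_from_pos : Prop := ∀ (asteroids : List (Int × Int)) (a : Int × Int), Dom_gen_from_pos asteroids a → Spec_gen_from_pos asteroids a (gen_from_pos asteroids a)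

-- ===== LEMMAS AND PROOFS =====

-- both gcds compute Nat.gcd on nonnegative inputs
lemma gcdLoop_eq_gcd (y x : Int) (hx : 0 ≤ x) (hy : 0 ≤ y) :
    gcdLoop x y = (Nat.gcd x.toNat y.toNat : Int) := by
  rw [gcdLoop]
  by_cases h0 : y = 0
  · simp [h0, Int.toNat_of_nonneg hx]
  · rw [dif_neg h0]
    have hyp : 0 < y := lt_of_le_of_ne hy (Ne.symm h0)
    have hm : PySem.Int.mod x y = x % y := PySem.Int.mod_eq_emod_of_pos hyp
    have hm0 : 0 ≤ x % y := Int.emod_nonneg x h0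
    have hmlt : x % y < y := Int.emod_lt_of_pos x hyp
    have ih := gcdLoop_eq_gcd (PySem.Int.mod x y) y hy (by rw [hm]; exact hm0)
    rw [ih]
    have htn : (PySem.Int.mod x y).toNat = x.toNat % y.toNat := by
      rw [hm]
      conv_lhs => rw [← Int.toNat_of_nonneg hx, ← Int.toNat_of_nonneg hy]
      rw [← Int.natCast_emod]
      exact Int.toNat_natCast _
    rw [htn]
    rw [Nat.gcd_comm y.toNat, ← Nat.gcd_rec, Nat.gcd_comm]
termination_by y.natAbs
decreasing_by
  have h2 := PySem.Int.mod_lt x hyp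
  have h3 := PySem.Int.mod_nonneg x hyp
  omega

lemma gcdA_eq_gcd (y x : Int) (hy : 0 < y) (hx : 0 ≤ x) :
    gcdA x y = (Nat.gcd x.toNat y.toNat : Int) := by
  rw [gcdA, dif_neg (by omega : y ≠ 0)]
  have hm : PySem.Int.mod x y = x % y := PySem.Int.mod_eq_emod_of_pos hy
  have htn : (PySem.Int.mod x y).toNat = x.toNat % y.toNat := by
    rw [hm]
    conv_lhs => rw [← Int.toNat_of_nonneg hx, ← Int.toNat_of_nonneg hy.le]
    rw [← Int.natCast_emod]
    exact Int.toNat_natCast _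
  have hkey : Nat.gcd x.toNat y.toNat = Nat.gcd y.toNat (x.toNat % y.toNat) := by
    rw [Nat.gcd_comm x.toNat, Nat.gcd_rec y.toNat, Nat.gcd_comm]
  show (if h1 : PySem.Int.mod x y = 0 then y else gcdA y (PySem.Int.mod x y)) = ((Nat.gcd x.toNat y.toNat : Nat) : Int)
  by_cases h1 : PySem.Int.mod x y = 0
  · rw [dif_pos h1]
    have : x.toNat % y.toNat = 0 := by rw [← htn, h1]; rfl
    rw [hkey, this, Nat.gcd_zero_right, Int.toNat_of_nonneg hy.le]
  · rw [dif_neg h1]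
    have hmpos : 0 < PySem.Int.mod x y := by
      have := PySem.Int.mod_nonneg x hy; omega
    have ih := gcdA_eq_gcd (PySem.Int.mod x y) y hmpos hy.le
    rw [ih, htn, hkey]
termination_by y.natAbs
decreasing_by
  have h2 := PySem.Int.mod_lt x hy
  omega

-- the two ratio computations agree off the origin
lemma ratio_agree (h v : Int) (hne : ¬(h = 0 ∧ v = 0)) :
    angle_ratio h v = (PySem.Int.floordiv h (gcdLoop |h| |v|), PySem.Int.floordiv v (gcdLoop |h| |v|)) := by
  rw [angle_ratio]
  by_cases hh : h = 0
  · have hv : v ≠ 0 := fun hv => hne ⟨hh, hv⟩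
    rw [if_neg (by tauto), if_pos hh]
    have habs : (0:Int) < |v| := abs_pos.mpr hv
    have hg : gcdLoop |h| |v| = |v| := by
      rw [hh]
      rw [gcdLoop_eq_gcd _ _ (by simp) (abs_nonneg v)]
      simp [Int.toNat_of_nonneg (abs_nonneg v)]
    rw [hg, hh]
    rw [PySem.Int.floordiv_eq_ediv_of_pos habs, PySem.Int.floordiv_eq_ediv_of_pos habs]
    rcases lt_trichotomy v 0 with hvn | hv0 | hvp
    · rw [if_neg (by omega), if_pos hvn]
      have : |v| = -v := abs_of_neg hvn
      rw [this]
      have hd : -v ∣ v := ⟨-1, by ring⟩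
      have hdiv : v / -v = -1 := by rw [Int.ediv_eq_iff_eq_mul_left (by omega) hd]; ring
      simp [hdiv]
    · exact absurd hv0 hv
    · rw [if_pos hvp]
      have : |v| = v := abs_of_pos hvp
      rw [this, Int.ediv_self hv]
      simp
  · by_cases hv : v = 0
    · rw [if_neg (by tauto), if_neg hh, if_pos hv]
      have habs : (0:Int) < |h| := abs_pos.mpr hh
      have hg : gcdLoop |h| |v| = |h| := by
        rw [hv]
        rw [gcdLoop_eq_gcd _ _ (abs_nonneg h) (by simp)]
        simp [Int.toNat_of_nonneg (abs_nonneg h)]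
      rw [hg, hv]
      rw [PySem.Int.floordiv_eq_ediv_of_pos habs, PySem.Int.floordiv_eq_ediv_of_pos habs]
      rcases lt_trichotomy h 0 with hhn | hh0 | hhp
      · rw [if_neg (by omega), if_pos hhn]
        have h1 : |h| = -h := abs_of_neg hhn
        rw [h1]
        have hd : -h ∣ h := ⟨-1, by ring⟩
        have hdiv : h / -h = -1 := by rw [Int.ediv_eq_iff_eq_mul_left (by omega) hd]; ring
        simp [hdiv]
      · exact absurd hh0 hh
      · rw [if_pos hhp]
        have h1 : |h| = h := abs_of_pos hhp
        rw [h1, Int.ediv_self hh]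
        simp
    · rw [if_pos ⟨hh, hv⟩]
      have hha : (0:Int) < |h| := abs_pos.mpr hh
      have hva : (0:Int) < |v| := abs_pos.mpr hv
      have hloop : gcdLoop |h| |v| = (Nat.gcd |h|.toNat |v|.toNat : Int) :=
        gcdLoop_eq_gcd _ _ (abs_nonneg h) (abs_nonneg v)
      have hgcf : (if |v| > |h| then gcdA |v| |h| else gcdA |h| |v|) = gcdLoop |h| |v| := by
        by_cases hc : |v| > |h|
        · rw [if_pos hc, gcdA_eq_gcd _ _ hha (abs_nonneg v), hloop, Nat.gcd_comm]
        · rw [if_neg hc, gcdA_eq_gcd _ _ hva (abs_nonneg h), hloop]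
      rw [hgcf]

-- B's reduced-direction computation, as a function (proof-side abbreviation)
def ratioB (a o : Int × Int) : Int × Int :=
  (PySem.Int.floordiv (o.1 - a.1) (gcdLoop |o.1 - a.1| |o.2 - a.2|),
   PySem.Int.floordiv (o.2 - a.2) (gcdLoop |o.1 - a.1| |o.2 - a.2|))

def fB (a o : Int × Int) : (Int × Int) × (Int × Int) := (ratioB a o, o)

-- A's dict loop is the modify-fold over the (ratio, asteroid) pairs of the kept asteroids
lemma A_fold (a : Int × Int) (l : List (Int × Int)) :
    ∀ (d : PySem.Dict (Int × Int) (List (Int × Int))),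
      l.foldl (fun from_pos o =>
        if o = a then from_pos
        else
          let y_dif := o.2 - a.2
          let x_dif := o.1 - a.1
          let ratio := angle_ratio x_dif y_dif
          match from_pos.get? ratio with
          | some value => from_pos.insert ratio (value ++ [o])
          | none => from_pos.insert ratio [o]) d
      = ((l.filter (fun o => decide (o ≠ a))).map (fB a)).foldl
          (fun d q => d.modify q.1 [] (fun v => v ++ [q.2])) d := by
  induction l with
  | nil => intro d; rfl
  | cons o t ih =>
    intro d
    by_cases hc : o = a
    · rw [List.foldl_cons, if_pos hc, List.filter_cons_of_neg (by simp [hc])]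
      exact ih d
    · rw [List.foldl_cons, if_neg hc,
          List.filter_cons_of_pos (by simp [hc]), List.map_cons, List.foldl_cons, ih]
      congr 1
      have hr : angle_ratio (o.1 - a.1) (o.2 - a.2) = ratioB a o := by
        have hne : ¬(o.1 - a.1 = 0 ∧ o.2 - a.2 = 0) := by
          rintro ⟨h1, h2⟩
          exact hc (Prod.ext_iff.mpr ⟨by omega, by omega⟩)
        rw [ratio_agree _ _ hne]; rfl
      show (match d.get? (angle_ratio (o.1 - a.1) (o.2 - a.2)) with
            | some value => d.insert (angle_ratio (o.1 - a.1) (o.2 - a.2)) (value ++ [o])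
            | none => d.insert (angle_ratio (o.1 - a.1) (o.2 - a.2)) [o])
          = d.modify (fB a o).1 [] (fun v => v ++ [(fB a o).2])
      rw [hr]
      cases hg : d.get? (ratioB a o) with
      | some value => simp [PySem.Dict.modify, PySem.Dict.getD, hg, fB]
      | none => simp [PySem.Dict.modify, PySem.Dict.getD, hg, fB]

-- B's first pass builds exactly those pairs
lemma B_pairs (a : Int × Int) (l : List (Int × Int)) :
    l.foldl (fun ps o =>
      if o ≠ a then
        let h := o.1 - a.1
        let v := o.2 - a.2
        let x := gcdLoop |h| |v|
        ps ++ [((PySem.Int.floordiv h x, PySem.Int.floordiv v x), o)]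
      else ps) ([] : List ((Int × Int) × (Int × Int)))
    = (l.filter (fun o => decide (o ≠ a))).map (fB a) := by
  have hstep : (fun (ps : List ((Int × Int) × (Int × Int))) (o : Int × Int) =>
      if o ≠ a then
        let h := o.1 - a.1
        let v := o.2 - a.2
        let x := gcdLoop |h| |v|
        ps ++ [((PySem.Int.floordiv h x, PySem.Int.floordiv v x), o)]
      else ps)
      = (fun ps o => if (fun o => decide (o ≠ a)) o = true then ps ++ [fB a o] else ps) := by
    funext ps o
    by_cases hc : o = a <;> simp [hc, fB, ratioB]
  rw [hstep, PySem.List.foldl_append_if]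
  simp

-- grouping: the items of the modify-fold are the dedup-keyed groups
lemma items_group (pairs : List ((Int × Int) × (Int × Int))) :
    (pairs.foldl (fun d q => d.modify q.1 [] (fun v => v ++ [q.2]))
        (PySem.Dict.empty : PySem.Dict (Int × Int) (List (Int × Int)))).items
    = (PySem.List.dedup (pairs.map (·.1))).map
        (fun r => (r, (pairs.filter (fun p => p.1 == r)).map (·.2))) := by
  have hnd : (pairs.foldl (fun d q => d.modify q.1 [] (fun v => v ++ [q.2]))
      (PySem.Dict.empty : PySem.Dict (Int × Int) (List (Int × Int)))).keys.Nodup := by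
    exact PySem.Dict.nodup_keys_foldl_modify_key pairs Prod.fst []
      (fun _ q => (fun v => v ++ [q.2])) PySem.Dict.empty List.nodup_nil
  rw [PySem.Dict.items_eq_map_keys _ hnd []]
  have hkeys : (pairs.foldl (fun d q => d.modify q.1 [] (fun v => v ++ [q.2]))
      (PySem.Dict.empty : PySem.Dict (Int × Int) (List (Int × Int)))).keys
      = PySem.List.dedup (pairs.map (·.1)) := by
    rw [PySem.Dict.keys_foldl_modify_key pairs Prod.fst []
      (fun _ q => (fun v => v ++ [q.2])) PySem.Dict.empty, PySem.List.dedup_eq_ofList]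
    rfl
  rw [hkeys]
  apply List.map_congr_left
  intro r _
  rw [PySem.Dict.getD_foldl_modify_append pairs PySem.Dict.empty r]
  rfl

-- ===== VERDICT (by name: the statement is the Claim_ definition above) =====
theorem gen_from_pos_spec : Claim_equal_gen_from_pos := by
  intro asteroids a _
  show gen_from_pos asteroids a = gen_from_pos_alt asteroids a
  rw [gen_from_pos, gen_from_pos_alt]
  rw [A_fold a asteroids PySem.Dict.empty, B_pairs a asteroids, items_group]
  rw [List.map_map]
  rfl
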